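-- pv_equiv track=rewrite | github.com/sehagler/llm_biomarker_extraction | biomarkers_prompts/lib/prompts_base.py | _get_superstring
-- ===== SOURCE A (Python) =====
-- def _get_superstring(result_list):
--     input_str_list = result_list
--     for i in range(len(input_str_list)):
--         input_str_list[i] = input_str_list[i].lower()
--     output_str_list = []
--     input_str_list = list(set(input_str_list))
--     for x in input_str_list:
--         not_substring = True
--         for y in input_str_list:
--             if x != y:
--                 if x in y:
--                     not_substring = False
--         if not_substring:
--             output_str_list.append(x)
--     result_list = output_str_list
--     return result_list
-- ===== SOURCE B (Python) =====
-- def _get_superstring(result_list):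
--     # Like A, lowercases the elements of result_list in place; return value compared here.
--     for i in range(len(result_list)):
--         result_list[i] = result_list[i].lower()
--     uniq = list(dict.fromkeys(result_list))
--     # one pass building the set of all strict substrings; a string is kept
--     # iff it is not a strict substring of any (other) string
--     kills = set()
--     for y in uniq:
--         n = len(y)
--         for i in range(n + 1):
--             for j in range(i, n + 1):
--                 if j - i < n:
--                     kills.add(y[i:j])
--     return [x for x in uniq if x not in kills]
-- ===== Notes on version B (the rewrite author's own statement) =====
-- stated objective: faster
-- what changed: A tests every pair (x, y) with Python's 'x in y' substring scan; B instead builds, in one pass over the deduplicated strings, the set of all strict substrings y[i:j] (j-i < len(y)) and keeps exactly the strings not in that set, removing the quadratic pairwise scan.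
import Mathlib
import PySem

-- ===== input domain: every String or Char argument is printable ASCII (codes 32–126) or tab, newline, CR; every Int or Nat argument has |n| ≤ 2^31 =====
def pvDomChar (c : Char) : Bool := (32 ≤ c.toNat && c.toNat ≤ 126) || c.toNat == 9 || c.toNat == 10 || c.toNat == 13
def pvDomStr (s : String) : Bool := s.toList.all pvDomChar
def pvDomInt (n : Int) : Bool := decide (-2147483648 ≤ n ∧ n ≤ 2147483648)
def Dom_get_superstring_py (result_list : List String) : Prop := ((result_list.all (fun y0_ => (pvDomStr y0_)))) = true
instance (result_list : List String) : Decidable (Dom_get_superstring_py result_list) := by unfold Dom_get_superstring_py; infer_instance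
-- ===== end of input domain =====

-- B replaces A's all-pairs 'x in y' scan by one set of all strict substrings built in a single pass;
-- A lowercases its argument's elements IN PLACE (B does the same); the equivalence proved is about the return value.
-- Python A returns its result in 'list(set(...))' hash order and is compared as a set; the ports both use
-- PySem.Set's first-occurrence order, the one determinate order of that set.

-- ===== PORT A =====
-- the 'for i in range(len(...)): lst[i] = lst[i].lower()' loop, element by element
def pvLowerAll : List String → List String
  | [] => []
  | s :: rest => PySem.Str.lower s :: pvLowerAll rest

def get_superstring_py (result_list : List String) : List String :=
  let input_str_list := PySem.Set.ofList (pvLowerAll result_list)   -- list(set(...))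
  input_str_list.foldl (fun output_str_list x =>
    let not_substring := input_str_list.foldl (fun b y =>
      if x ≠ y then (if PySem.Str.isIn x y then false else b) else b) true
    if not_substring then output_str_list ++ [x] else output_str_list) []

-- ===== PORT B =====
-- the nested 'for i in range(n+1): for j in range(i, n+1): if j - i < n: kills.add(y[i:j])' loops
def pvAddStrictSubs (k : PySem.Set String) (y : String) : PySem.Set String :=
  (PySem.List.pyRange 0 (PySem.Str.len y + 1) 1).foldl (fun k i =>
    (PySem.List.pyRange i (PySem.Str.len y + 1) 1).foldl (fun k j =>
      if j - i < PySem.Str.len y then PySem.Set.add k (PySem.Str.slice y (some i) (some j)) else k) k) k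

def get_superstring_py_alt (result_list : List String) : List String :=
  let uniq := PySem.List.dedup (result_list.map PySem.Str.lower)
  let kills := uniq.foldl pvAddStrictSubs PySem.Set.empty
  uniq.filter (fun x => !(PySem.Set.contains kills x))

-- ===== PRECONDITION & SPEC =====
def Spec_get_superstring_py (result_list : List String) (out : List String) : Prop := out = get_superstring_py_alt result_list
instance (result_list : List String) (out : List String) : Decidable (Spec_get_superstring_py result_list out) := by unfold Spec_get_superstring_py; infer_instance

-- ===== CLAIM (what is proved, stated in full; the proofs are below) =====
def Claim_equal_get_superstring_py : Prop := ∀ (result_list : List String), Dom_get_superstring_py result_list → Spec_get_superstring_py result_list (get_superstring_py result_list)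

-- ===== LEMMAS AND PROOFS =====

theorem pvLowerAll_eq_map (l : List String) : pvLowerAll l = l.map PySem.Str.lower := by
  induction l with
  | nil => rfl
  | cons s t ih => simp [pvLowerAll, ih]

-- A's inner loop: 'not_substring' starts at b and is only ever set to False
theorem pvInnerFold (x : String) (l : List String) (b : Bool) :
    l.foldl (fun b y => if x ≠ y then (if PySem.Str.isIn x y then false else b) else b) b
    = (b && decide (∀ y ∈ l, x ≠ y → PySem.Str.isIn x y = false)) := by
  induction l generalizing b with
  | nil => simp
  | cons y t ih =>
    simp only [List.foldl_cons, ih, List.forall_mem_cons]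
    by_cases hxy : x = y
    · simp [hxy]
    · by_cases hin : PySem.Str.isIn x y <;>
        cases b <;> first | (simp [hxy, hin]; done) | (simp [hxy]; done) | (simp [hxy]; rfl)

-- membership after folding set-updates whose single-step membership is known
theorem pvMemFoldlSet {β : Type} (F : PySem.Set String → β → PySem.Set String)
    (P : β → String → Prop)
    (h : ∀ s e x, x ∈ F s e ↔ x ∈ s ∨ P e x) :
    ∀ (l : List β) (s : PySem.Set String) (x : String),
      x ∈ l.foldl F s ↔ x ∈ s ∨ ∃ e ∈ l, P e x := by
  intro l
  induction l with
  | nil => simp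
  | cons e t ih =>
    intro s x
    simp only [List.foldl_cons, ih, h, List.exists_mem_cons_iff]
    tauto

-- a slice y[i:j] with j - i < len(y) is exactly a strict infix of y
theorem pvMemAddStrictSubs (k : PySem.Set String) (y x : String) :
    x ∈ pvAddStrictSubs k y ↔
      x ∈ k ∨ (x.toList <:+: y.toList ∧ x.toList.length < y.toList.length) := by
  unfold pvAddStrictSubs
  have hone : ∀ (s : PySem.Set String) (i : Int) (x : String),
      x ∈ (PySem.List.pyRange i (PySem.Str.len y + 1) 1).foldl (fun k j =>
        if j - i < PySem.Str.len y then PySem.Set.add k (PySem.Str.slice y (some i) (some j)) else k) s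
      ↔ x ∈ s ∨ ∃ j ∈ PySem.List.pyRange i (PySem.Str.len y + 1) 1,
          j - i < PySem.Str.len y ∧ x = PySem.Str.slice y (some i) (some j) := by
    intro s i x
    refine pvMemFoldlSet _ (fun j x => j - i < PySem.Str.len y ∧ x = PySem.Str.slice y (some i) (some j)) ?_ _ s x
    intro s j x
    split
    · simp only [PySem.Set.mem_add]; tauto
    · simp only []; tauto
  rw [pvMemFoldlSet _ (fun i x => ∃ j ∈ PySem.List.pyRange i (PySem.Str.len y + 1) 1,
        j - i < PySem.Str.len y ∧ x = PySem.Str.slice y (some i) (some j)) hone]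
  have hlen : PySem.Str.len y = (y.toList.length : Int) := PySem.Str.len_eq y
  constructor
  · rintro (hk | ⟨i, hi, j, hj, hlt, rfl⟩)
    · exact Or.inl hk
    · right
      rw [PySem.List.mem_pyRange_one] at hi hj
      have h0i : 0 ≤ i := hi.1
      have h0j : 0 ≤ j := le_trans h0i hj.1
      have htl : (PySem.Str.slice y (some i) (some j)).toList
          = (y.toList.drop i.toNat).take (j.toNat - i.toNat) := by
        simp [PySem.Str.slice, PySem.List.slice_toNat _ h0i h0j]
      constructor
      · rw [htl]
        exact ((List.take_prefix _ _).isInfix).trans (List.drop_suffix _ _).isInfix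
      · rw [htl]
        simp only [List.length_take, List.length_drop]
        omega
  · rintro (hk | ⟨hinf, hlt⟩)
    · exact Or.inl hk
    · right
      obtain ⟨s, t, hst⟩ := hinf
      have hsum : s.length + x.toList.length + t.length = y.toList.length := by
        rw [← hst]; simp; omega
      refine ⟨(s.length : Int), ?_, (s.length : Int) + (x.toList.length : Int), ?_, ?_, ?_⟩
      · rw [PySem.List.mem_pyRange_one]
        constructor
        · positivity
        · omega
      · rw [PySem.List.mem_pyRange_one]
        constructor <;> omega
      · omega
      · apply String.toList_inj.mp
        have hsl : (PySem.Str.slice y (some (s.length : Int))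
              (some ((s.length : Int) + (x.toList.length : Int)))).toList
            = (y.toList.drop s.length).take x.toList.length := by
          simp [PySem.Str.slice, PySem.List.slice_natCast_add]
        rw [hsl, ← hst, List.append_assoc, List.drop_left]
        exact (List.take_left' rfl).symm

-- per pair: 'x ≠ y and x in y' is exactly 'x strict infix of y'
theorem pvPairIff (x y : String) :
    (x ≠ y ∧ PySem.Str.isIn x y = true) ↔
      (x.toList <:+: y.toList ∧ x.toList.length < y.toList.length) := by
  rw [PySem.Str.isIn_iff_infix]
  constructor
  · rintro ⟨hne, hinf⟩
    refine ⟨hinf, ?_⟩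
    rcases lt_or_eq_of_le hinf.length_le with h | h
    · exact h
    · exact absurd (String.toList_inj.mp (hinf.eq_of_length h)) hne
  · rintro ⟨hinf, hlt⟩
    refine ⟨?_, hinf⟩
    intro h; rw [h] at hlt; omega

-- A's outer loop is a filter by the inner loop's verdict
theorem pvAFilter (u : List String) :
    u.foldl (fun output_str_list x =>
      let not_substring := u.foldl (fun b y =>
        if x ≠ y then (if PySem.Str.isIn x y then false else b) else b) true
      if not_substring then output_str_list ++ [x] else output_str_list) []
    = u.filter (fun x => decide (∀ y ∈ u, x ≠ y → PySem.Str.isIn x y = false)) := by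
  have h := PySem.List.foldl_append_if
      (fun x => decide (∀ y ∈ u, x ≠ y → PySem.Str.isIn x y = false)) (fun x => x) u []
  simp only [pvInnerFold, Bool.true_and]
  simpa using h

theorem get_superstring_py_eq (result_list : List String) :
    get_superstring_py result_list = get_superstring_py_alt result_list := by
  unfold get_superstring_py get_superstring_py_alt
  simp only [pvLowerAll_eq_map, PySem.List.dedup_eq_ofList]
  rw [pvAFilter]
  apply List.filter_congr
  intro x hx
  set u := PySem.Set.ofList (result_list.map PySem.Str.lower) with hu
  set K := u.foldl pvAddStrictSubs PySem.Set.empty with hK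
  have hmem : x ∈ K ↔ ∃ y ∈ u, x.toList <:+: y.toList ∧ x.toList.length < y.toList.length := by
    rw [hK, pvMemFoldlSet pvAddStrictSubs
        (fun y x => x.toList <:+: y.toList ∧ x.toList.length < y.toList.length)
        (fun s e x => pvMemAddStrictSubs s e x)]
    simp [PySem.Set.empty]
  have hc : (PySem.Set.contains K x = true) ↔
      ∃ y ∈ u, x.toList <:+: y.toList ∧ x.toList.length < y.toList.length := by
    rw [show (PySem.Set.contains K x = true) ↔ x ∈ K from by simp [PySem.Set.contains]]
    exact hmem
  have hiff : (∀ y ∈ u, x ≠ y → PySem.Str.isIn x y = false)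
      ↔ ¬ ∃ y ∈ u, x.toList <:+: y.toList ∧ x.toList.length < y.toList.length := by
    constructor
    · rintro h ⟨y, hy, hinf, hlt⟩
      have hp := (pvPairIff x y).mpr ⟨hinf, hlt⟩
      have hf := h y hy hp.1
      rw [hp.2] at hf
      simp at hf
    · intro h y hy hne
      by_contra hin
      exact h ⟨y, hy, (pvPairIff x y).mp ⟨hne, by simpa using hin⟩⟩
  by_cases hQ : ∃ y ∈ u, x.toList <:+: y.toList ∧ x.toList.length < y.toList.length
  · rw [hc.mpr hQ]
    simp only [Bool.not_true]
    exact decide_eq_false (fun hP => (hiff.mp hP) hQ)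
  · have h1 : PySem.Set.contains K x = false := by
      rcases Bool.eq_false_or_eq_true (PySem.Set.contains K x) with h | h
      · exact absurd (hc.mp h) hQ
      · exact h
    rw [h1]
    simp only [Bool.not_false]
    exact decide_eq_true (hiff.mpr hQ)

-- ===== VERDICT (by name: the statement is the Claim_ definition above) =====
theorem get_superstring_py_spec : Claim_equal_get_superstring_py := by
  intro result_list _
  exact get_superstring_py_eq result_list
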